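-- pv_equiv track=rewrite | github.com/holi-lab/CoRE | edit_eval/evaluator.py | calculate_repetition_scores
-- ===== SOURCE A (Python) =====
-- from collections import Counter, defaultdict
-- from typing import Dict, List, Any, Optional, Tuple
--
-- def calculate_repetition_scores(text: str) -> Dict[str, float]:
--     def get_tokens(text: str) -> List[str]:
--         return text.replace('\n', ' ').strip().split()
--
--     def get_ngrams(tokens: List[str], n: int) -> List[tuple]:
--         return [(token,) for token in tokens] if n == 1 else list(zip(*[tokens[i:] for i in range(n)]))
--
--     def calc_segment_repetition(tokens: List[str], n: int) -> float:
--         ngrams = get_ngrams(tokens, n)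
--         if not ngrams:
--             return 0
--         counter = Counter(ngrams)
--         return sum(count - 1 for count in counter.values() if count > 1)
--
--     tokens = get_tokens(text)
--     if not tokens:
--         return {"SRS": 0}
--
--     srs_scores = [calc_segment_repetition(tokens, n) for n in range(1, 5)]
--     return {"SRS": sum(srs_scores)}
-- ===== SOURCE B (Python) =====
-- def calculate_repetition_scores(text: str):
--     tokens = text.replace('\n', ' ').strip().split()
--     if not tokens:
--         return {"SRS": 0}
--     # single streaming pass over start positions: every n-gram occurrence after
--     # its first sighting contributes 1; no n-gram lists, no Counter.
--     seen = set()
--     total = 0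
--     for i in range(len(tokens)):
--         for n in range(1, 5):
--             if i + n <= len(tokens):
--                 gram = tuple(tokens[i:i + n])
--                 if gram in seen:
--                     total += 1
--                 else:
--                     seen.add(gram)
--     return {"SRS": total}
-- ===== Notes on version B (the rewrite author's own statement) =====
-- stated objective: alternative
-- what changed: Replaces the four staged passes (build the full n-gram list, build a Counter, sum count-1 over values>1, then sum the four scores) by a single streaming pass over token start positions that maintains one shared seen-set of grams of all four lengths and increments the total by 1 for every gram occurrence after its first sighting; no n-gram lists and no frequency table are ever materialized.
import Mathlib
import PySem

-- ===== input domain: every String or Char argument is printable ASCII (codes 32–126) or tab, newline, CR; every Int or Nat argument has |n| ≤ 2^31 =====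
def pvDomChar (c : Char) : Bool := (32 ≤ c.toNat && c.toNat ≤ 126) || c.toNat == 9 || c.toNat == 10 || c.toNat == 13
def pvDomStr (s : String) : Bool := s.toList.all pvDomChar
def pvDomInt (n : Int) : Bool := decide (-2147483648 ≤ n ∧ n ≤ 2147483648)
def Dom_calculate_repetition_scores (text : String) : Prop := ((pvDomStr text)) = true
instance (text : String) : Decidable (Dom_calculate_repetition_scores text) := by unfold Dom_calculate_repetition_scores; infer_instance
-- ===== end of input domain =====

-- B replaces A's four staged passes (n-gram list, Counter, filtered sum of count-1, sum of the four
-- scores) by ONE streaming pass over token start positions with a single shared seen-set of grams of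
-- all four lengths, adding 1 for every gram occurrence after its first sighting (objective: alternative).

-- ===== PORT A =====
-- helper get_tokens: text.replace('\n', ' ').strip().split()
def pvA_get_tokens (text : String) : List String :=
  PySem.Str.split₀ (PySem.Str.strip (PySem.Str.replace text "\n" " "))

-- Python's variadic zip(*lists) over lists of tokens, tuple ported as List String;
-- exact: zip truncates to the shortest argument, zip of one list yields 1-tuples.
def pvA_zipStar : List (List String) → List (List String)
  | [] => []
  | [l] => l.map (fun x => [x])
  | l :: rest => ((l.zip (pvA_zipStar rest)).map (fun p => p.1 :: p.2))

-- helper get_ngrams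
def pvA_get_ngrams (tokens : List String) (n : Int) : List (List String) :=
  if n == 1 then tokens.map (fun t => [t])
  else pvA_zipStar ((PySem.List.pyRange 0 n 1).map (fun i => PySem.List.slice tokens (some i) none))

-- helper calc_segment_repetition
def pvA_calc_segment (tokens : List String) (n : Int) : Int :=
  let ngrams := pvA_get_ngrams tokens n
  if ngrams = [] then 0
  else (((PySem.Dict.counter ngrams).values.filter (fun c => decide (1 < c))).map (fun c => c - 1)).sum

def calculate_repetition_scores (text : String) : List (String × Int) :=
  let tokens := pvA_get_tokens text
  if tokens = [] then [("SRS", 0)]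
  else
    let srs_scores := (PySem.List.pyRange 1 5 1).map (fun n => pvA_calc_segment tokens n)
    [("SRS", srs_scores.sum)]

-- ===== PORT B =====
def calculate_repetition_scores_alt (text : String) : List (String × Int) :=
  let tokens := PySem.Str.split₀ (PySem.Str.strip (PySem.Str.replace text "\n" " "))
  if tokens = [] then [("SRS", 0)]
  else
    let st := (PySem.List.pyRange 0 (tokens.length : Int) 1).foldl (fun st i =>
      (PySem.List.pyRange 1 5 1).foldl (fun st n =>
        if i + n ≤ (tokens.length : Int) then
          if PySem.Set.contains st.1 (PySem.List.slice tokens (some i) (some (i + n))) then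
            (st.1, st.2 + 1)
          else
            (PySem.Set.add st.1 (PySem.List.slice tokens (some i) (some (i + n))), st.2)
        else st) st) ((PySem.Set.empty : PySem.Set (List String)), (0 : Int))
    [("SRS", st.2)]

-- ===== PRECONDITION & SPEC =====
def Spec_calculate_repetition_scores (text : String) (out : List (String × Int)) : Prop := out = calculate_repetition_scores_alt text
instance (text : String) (out : List (String × Int)) : Decidable (Spec_calculate_repetition_scores text out) := by unfold Spec_calculate_repetition_scores; infer_instance

-- ===== CLAIM (what is proved, stated in full; the proofs are below) =====
def Claim_equal_calculate_repetition_scores : Prop := ∀ (text : String), Dom_calculate_repetition_scores text → Spec_calculate_repetition_scores text (calculate_repetition_scores text)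

-- ===== LEMMAS AND PROOFS =====

-- the sliding windows of length n, recursively
def pvWins (n : Nat) : List String → List (List String)
  | [] => []
  | x :: t => if n ≤ t.length + 1 then (x :: t).take n :: pvWins n t else []

-- B's loop body on one gram
def pvStep (st : PySem.Set (List String) × Int) (g : List String) : PySem.Set (List String) × Int :=
  if PySem.Set.contains st.1 g then (st.1, st.2 + 1) else (PySem.Set.add st.1 g, st.2)

-- the grams B visits at start position i, in inner-loop order
def pvInner (t : List String) (i : Int) : List (List String) :=
  (([1, 2, 3, 4] : List Int).filter (fun n => decide (i + n ≤ (t.length : Int)))).map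
    (fun n => PySem.List.slice t (some i) (some (i + n)))

-- all grams B visits, in processing order
def pvGrams (t : List String) : List (List String) :=
  (PySem.List.pyRange 0 (t.length : Int) 1).flatMap (pvInner t)

theorem pvWins_map_singleton (l : List String) : l.map (fun t => [t]) = pvWins 1 l := by
  induction l with
  | nil => rfl
  | cons x t ih => simp [pvWins, ih]

theorem pvWins_zip (n : Nat) (hn : 1 ≤ n) (l : List String) :
    ((l.zip (pvWins n (l.drop 1))).map (fun p => p.1 :: p.2)) = pvWins (n + 1) l := by
  induction l with
  | nil => rfl
  | cons x t ih =>
    cases t with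
    | nil => simp [pvWins]; omega
    | cons y t' =>
      simp only [List.drop_succ_cons, List.drop_zero] at ih ⊢
      have hrhs : pvWins (n + 1) (x :: y :: t')
          = if n + 1 ≤ (y :: t').length + 1 then ((x :: y :: t').take (n + 1)) :: pvWins (n + 1) (y :: t') else [] := rfl
      rw [pvWins]
      by_cases h : n ≤ t'.length + 1
      · rw [if_pos h]
        simp only [List.zip_cons_cons, List.map_cons]
        rw [ih, hrhs, if_pos (by simp; omega)]
        simp
      · rw [if_neg h]
        simp only [List.zip_nil_right, List.map_nil]
        rw [hrhs, if_neg (by simp; omega)]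

theorem pvWins_range (n : Nat) (hn : 1 ≤ n) (l : List String) :
    (List.range (l.length + 1 - n)).map (fun k => (l.drop k).take n) = pvWins n l := by
  induction l with
  | nil => simp [pvWins]; omega
  | cons x t ih =>
    rw [pvWins]
    by_cases h : n ≤ t.length + 1
    · rw [if_pos h]
      have : (x :: t).length + 1 - n = (t.length + 1 - n) + 1 := by simp; omega
      rw [this, List.range_succ_eq_map]
      simp only [List.map_cons, List.map_map, List.drop_zero]
      rw [← ih]
      rfl
    · rw [if_neg h]
      simp only [List.length_cons]
      have h0 : t.length + 1 + 1 - n = 0 := by omega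
      rw [h0]
      rfl

-- the sliding-window slice comprehension computes pvWins
theorem pvB_windows (n : Nat) (hn : 1 ≤ n) (l : List String) :
    (PySem.List.pyRange 0 ((l.length : Int) - (n : Int) + 1) 1).map
      (fun i => PySem.List.slice l (some i) (some (i + (n : Int)))) = pvWins n l := by
  rw [PySem.List.pyRange_one]
  rw [List.map_map]
  have he : ((l.length : Int) - (n : Int) + 1 - 0).toNat = l.length + 1 - n := by omega
  rw [he, ← pvWins_range n hn l]
  apply List.map_congr_left
  intro k _
  show PySem.List.slice l (some (0 + (k : Int))) (some (0 + (k : Int) + (n : Int))) = _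
  rw [zero_add]
  exact PySem.List.slice_natCast_add l k n

-- A's counter-based segment score equals length minus number of distinct n-grams
theorem pvSum_counts (l S : List (List String)) (hS : ∀ k ∈ S, k ∈ l) :
    (((S.map (fun k => (l.count k : Int))).filter (fun c => decide (1 < c))).map (fun c => c - 1)).sum
      = (S.map (fun k => (l.count k : Int))).sum - S.length := by
  induction S with
  | nil => simp
  | cons k S' ih =>
    have hk : 0 < l.count k := List.count_pos_iff.mpr (hS k (by simp))
    have ih' := ih (fun a ha => hS a (by simp [ha]))
    rw [List.map_cons, List.filter_cons]
    by_cases h : (1:Int) < (l.count k : Int)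
    · rw [if_pos (by simpa using h), List.map_cons, List.sum_cons, ih',
        List.sum_cons, List.length_cons]
      push_cast
      ring
    · have hc1 : (l.count k : Int) = 1 := by omega
      rw [if_neg (by simpa using h), ih', List.sum_cons, List.length_cons, hc1]
      push_cast
      ring

-- List.count with the default BEq on List String agrees with the DecidableEq-derived one
theorem pvCount_congr (x : List String) (m : List (List String)) :
    List.count x m = @List.count _ instBEqOfDecidableEq x m := by
  induction m with
  | nil => rfl
  | cons a m ih => simp [List.count_cons, ih, beq_iff_eq]

theorem pvSum_count_ofList (l : List (List String)) :
    ((PySem.Set.ofList l).map (fun k => (l.count k : Int))).sum = (l.length : Int) := by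
  have hperm : (PySem.Set.ofList l).Perm l.dedup := by
    rw [List.perm_ext_iff_of_nodup (PySem.Set.nodup_ofList l) l.nodup_dedup]
    intro a
    rw [PySem.Set.mem_ofList, List.mem_dedup]
  rw [(hperm.map (fun k => (l.count k : Int))).sum_eq]
  have h2 : l.dedup.map (fun k => (l.count k : Int)) = (l.dedup.map l.count).map Nat.cast := by
    simp [List.map_map]
  rw [h2, ← Nat.cast_list_sum]
  have h3 : l.dedup.map (fun a => l.count a) = l.dedup.map (fun a => @List.count _ instBEqOfDecidableEq a l) := by
    simp only [pvCount_congr]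
  exact_mod_cast congrArg Nat.cast (h3 ▸ List.sum_map_count_dedup_eq_length l)

theorem pvSeg_eq (l : List (List String)) :
    (if l = [] then 0
     else (((PySem.Dict.counter l).values.filter (fun c => decide (1 < c))).map (fun c => c - 1)).sum)
      = (l.length : Int) - ((PySem.Set.ofList l).length : Int) := by
  by_cases hl : l = []
  · simp [hl, PySem.Set.ofList]
  · rw [if_neg hl]
    have hv : (PySem.Dict.counter l).values = (PySem.Set.ofList l).map (fun k => (l.count k : Int)) := by
      show (PySem.Dict.counter l).items.map (·.2) = _
      rw [PySem.Dict.items_counter]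
      simp [List.map_map]
    rw [hv, pvSum_counts l _ (fun k hk => (PySem.Set.mem_ofList l k).mp hk), pvSum_count_ofList]

-- A's ngram lists are the sliding windows, for each n = 1..4
theorem pvA_ngrams_one (t : List String) : pvA_get_ngrams t 1 = pvWins 1 t := by
  rw [pvA_get_ngrams, if_pos (by decide)]
  exact pvWins_map_singleton t

theorem pvA_ngrams_two (t : List String) : pvA_get_ngrams t 2 = pvWins 2 t := by
  rw [pvA_get_ngrams, if_neg (by decide)]
  have hr : PySem.List.pyRange 0 2 1 = [0, 1] := by decide
  rw [hr]
  simp only [List.map_cons, List.map_nil, PySem.List.slice_zero_start,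
    PySem.List.slice_none_none, PySem.List.slice_from_one]
  rw [show pvA_zipStar [t, t.tail]
      = (t.zip (pvA_zipStar [t.tail])).map (fun p => p.1 :: p.2) from rfl]
  rw [show pvA_zipStar [t.tail] = t.tail.map (fun x => [x]) from rfl]
  rw [← List.drop_one, pvWins_map_singleton]
  exact pvWins_zip 1 (by omega) t

theorem pvA_ngrams_three (t : List String) : pvA_get_ngrams t 3 = pvWins 3 t := by
  rw [pvA_get_ngrams, if_neg (by decide)]
  have hr : PySem.List.pyRange 0 3 1 = [0, 1, 2] := by decide
  rw [hr]
  simp only [List.map_cons, List.map_nil, PySem.List.slice_zero_start,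
    PySem.List.slice_none_none, PySem.List.slice_from_one]
  have h2 : PySem.List.slice t (some 2) none = t.drop 2 := by
    rw [PySem.List.slice_from t (by norm_num)]; rfl
  rw [h2]
  rw [show pvA_zipStar [t, t.tail, t.drop 2]
      = (t.zip (pvA_zipStar [t.tail, t.drop 2])).map (fun p => p.1 :: p.2) from rfl]
  rw [show pvA_zipStar [t.tail, t.drop 2]
      = (t.tail.zip (pvA_zipStar [t.drop 2])).map (fun p => p.1 :: p.2) from rfl]
  rw [show pvA_zipStar [t.drop 2] = (t.drop 2).map (fun x => [x]) from rfl]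
  have : t.drop 2 = t.tail.drop 1 := by simp
  rw [this, pvWins_map_singleton, pvWins_zip 1 (by omega) t.tail]
  have : t.tail = t.drop 1 := by simp
  rw [this, pvWins_zip 2 (by omega) t]

theorem pvA_ngrams_four (t : List String) : pvA_get_ngrams t 4 = pvWins 4 t := by
  rw [pvA_get_ngrams, if_neg (by decide)]
  have hr : PySem.List.pyRange 0 4 1 = [0, 1, 2, 3] := by decide
  rw [hr]
  simp only [List.map_cons, List.map_nil, PySem.List.slice_zero_start,
    PySem.List.slice_none_none, PySem.List.slice_from_one]
  have h2 : PySem.List.slice t (some 2) none = t.drop 2 := by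
    rw [PySem.List.slice_from t (by norm_num)]; rfl
  have h3 : PySem.List.slice t (some 3) none = t.drop 3 := by
    rw [PySem.List.slice_from t (by norm_num)]; rfl
  rw [h2, h3]
  rw [show pvA_zipStar [t, t.tail, t.drop 2, t.drop 3]
      = (t.zip (pvA_zipStar [t.tail, t.drop 2, t.drop 3])).map (fun p => p.1 :: p.2) from rfl]
  rw [show pvA_zipStar [t.tail, t.drop 2, t.drop 3]
      = (t.tail.zip (pvA_zipStar [t.drop 2, t.drop 3])).map (fun p => p.1 :: p.2) from rfl]
  rw [show pvA_zipStar [t.drop 2, t.drop 3]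
      = ((t.drop 2).zip (pvA_zipStar [t.drop 3])).map (fun p => p.1 :: p.2) from rfl]
  rw [show pvA_zipStar [t.drop 3] = (t.drop 3).map (fun x => [x]) from rfl]
  have h32 : t.drop 3 = (t.drop 2).drop 1 := by simp
  rw [h32, pvWins_map_singleton, pvWins_zip 1 (by omega) (t.drop 2)]
  have h21 : t.drop 2 = t.tail.drop 1 := by simp
  rw [h21, pvWins_zip 2 (by omega) t.tail]
  have : t.tail = t.drop 1 := by simp
  rw [this, pvWins_zip 3 (by omega) t]

-- every window of pvWins n has exactly n tokens (disjointness of gram lengths across n)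
theorem pvWins_mem_length (n : Nat) (_hn : 1 ≤ n) (t : List String) (w : List String)
    (hw : w ∈ pvWins n t) : w.length = n := by
  induction t with
  | nil => simp [pvWins] at hw
  | cons x t ih =>
    rw [pvWins] at hw
    by_cases h : n ≤ t.length + 1
    · rw [if_pos h] at hw
      rcases List.mem_cons.mp hw with h1 | h2
      · subst h1; simp; omega
      · exact ih h2
    · rw [if_neg h] at hw; simp at hw

-- number of windows
theorem pvWins_length (n : Nat) (_hn : 1 ≤ n) (t : List String) :
    (pvWins n t).length = t.length + 1 - n := by
  induction t with
  | nil => simp [pvWins]; omega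
  | cons x t ih =>
    rw [pvWins]
    by_cases h : n ≤ t.length + 1
    · rw [if_pos h]; simp only [List.length_cons, ih]; omega
    · rw [if_neg h]; simp only [List.length_nil, List.length_cons]; omega

-- B's inner loop over n = 1..4 is a fold of pvStep over the grams at position i
set_option maxHeartbeats 1600000 in
theorem pvInner_fold (t : List String) (i : Int) (st : PySem.Set (List String) × Int) :
    (PySem.List.pyRange 1 5 1).foldl (fun st n =>
        if i + n ≤ (t.length : Int) then
          if PySem.Set.contains st.1 (PySem.List.slice t (some i) (some (i + n))) then
            (st.1, st.2 + 1)
          else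
            (PySem.Set.add st.1 (PySem.List.slice t (some i) (some (i + n))), st.2)
        else st) st
      = (pvInner t i).foldl pvStep st := by
  rw [show PySem.List.pyRange 1 5 1 = [1, 2, 3, 4] from by decide]
  have h43 : i + 4 ≤ (t.length : Int) → i + 3 ≤ (t.length : Int) := by omega
  have h32 : i + 3 ≤ (t.length : Int) → i + 2 ≤ (t.length : Int) := by omega
  have h21 : i + 2 ≤ (t.length : Int) → i + 1 ≤ (t.length : Int) := by omega
  by_cases h1 : i + 1 ≤ (t.length : Int) <;>
    by_cases h2 : i + 2 ≤ (t.length : Int) <;>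
      by_cases h3 : i + 3 ≤ (t.length : Int) <;>
        by_cases h4 : i + 4 ≤ (t.length : Int) <;>
          simp [pvInner, pvStep, List.filter, h1, h2, h3, h4]

-- B's double loop is a fold of pvStep over all visited grams
theorem pvOuter_fold (t : List String) (st : PySem.Set (List String) × Int) :
    (PySem.List.pyRange 0 (t.length : Int) 1).foldl (fun st i =>
      (PySem.List.pyRange 1 5 1).foldl (fun st n =>
        if i + n ≤ (t.length : Int) then
          if PySem.Set.contains st.1 (PySem.List.slice t (some i) (some (i + n))) then
            (st.1, st.2 + 1)
          else
            (PySem.Set.add st.1 (PySem.List.slice t (some i) (some (i + n))), st.2)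
        else st) st) st
      = (pvGrams t).foldl pvStep st := by
  rw [pvGrams, List.foldl_flatMap]
  apply List.foldl_ext
  intro st i _
  exact pvInner_fold t i st

-- streaming first-occurrence counting: final count = items seen minus distinct new elements
theorem pvStream (l : List (List String)) : ∀ (s : PySem.Set (List String)) (c : Int),
    l.foldl pvStep (s, c)
      = (PySem.Set.update s l,
         c + (l.length : Int) - (((PySem.Set.update s l).length : Int) - (s.length : Int))) := by
  induction l with
  | nil => intro s c; simp [PySem.Set.update]
  | cons g l ih =>
    intro s c
    by_cases hc : PySem.Set.contains s g
    · have hmem : g ∈ s := (PySem.Set.contains_iff s g).mp hc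
      have hadd : PySem.Set.add s g = s := by simp [PySem.Set.add, hmem]
      have hst : pvStep (s, c) g = (s, c + 1) := by simp [pvStep, hmem]
      have hupd : PySem.Set.update s (g :: l) = PySem.Set.update s l := by
        show (g :: l).foldl PySem.Set.add s = PySem.Set.update s l
        rw [List.foldl_cons, hadd]; rfl
      rw [List.foldl_cons, hst, ih s (c + 1), hupd]
      refine Prod.ext rfl ?_
      simp only [List.length_cons]
      push_cast
      ring
    · have hnm : g ∉ s := fun hm => hc ((PySem.Set.contains_iff s g).mpr hm)
      have hst : pvStep (s, c) g = (PySem.Set.add s g, c) := by simp [pvStep, hnm]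
      have hlen : (PySem.Set.add s g).length = s.length + 1 := by
        simp [PySem.Set.add, hnm]
      have hupd : PySem.Set.update s (g :: l) = PySem.Set.update (PySem.Set.add s g) l := by
        show (g :: l).foldl PySem.Set.add s = _
        rw [List.foldl_cons]; rfl
      rw [List.foldl_cons, hst, ih (PySem.Set.add s g) c, hupd]
      refine Prod.ext rfl ?_
      simp only [List.length_cons, hlen]
      push_cast
      ring

-- |set(l)| = |l.toFinset|
theorem pvOfList_length (l : List (List String)) :
    (PySem.Set.ofList l).length = l.toFinset.card := by
  have hfin : (PySem.Set.ofList l).toFinset = l.toFinset := by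
    ext g
    simp [List.mem_toFinset, PySem.Set.mem_ofList]
  rw [← hfin, List.toFinset_card_of_nodup (PySem.Set.nodup_ofList l)]

-- membership in pvGrams = membership in one of the four window lists
theorem pvMem_grams (t : List String) (g : List String) :
    g ∈ pvGrams t ↔ g ∈ pvWins 1 t ∨ g ∈ pvWins 2 t ∨ g ∈ pvWins 3 t ∨ g ∈ pvWins 4 t := by
  have hwin : ∀ n : Nat, 1 ≤ n →
      (g ∈ pvWins n t ↔ ∃ i : Int, (0 ≤ i ∧ i < (t.length : Int) - (n : Int) + 1) ∧
        g = PySem.List.slice t (some i) (some (i + (n : Int)))) := by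
    intro n hn
    rw [← pvB_windows n hn t]
    simp only [List.mem_map, PySem.List.mem_pyRange_one]
    constructor
    · rintro ⟨i, hi, rfl⟩; exact ⟨i, hi, rfl⟩
    · rintro ⟨i, hi, rfl⟩; exact ⟨i, hi, rfl⟩
  constructor
  · intro hg
    rcases List.mem_flatMap.mp hg with ⟨i, hi, hgi⟩
    rw [PySem.List.mem_pyRange_one] at hi
    rcases List.mem_map.mp hgi with ⟨n, hn, rfl⟩
    rcases List.mem_filter.mp hn with ⟨hn4, hle⟩
    have hle' : i + n ≤ (t.length : Int) := of_decide_eq_true hle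
    fin_cases hn4
    · exact Or.inl ((hwin 1 (by omega)).mpr ⟨i, ⟨hi.1, by push_cast; omega⟩, by norm_num⟩)
    · exact Or.inr (Or.inl ((hwin 2 (by omega)).mpr ⟨i, ⟨hi.1, by push_cast; omega⟩, by norm_num⟩))
    · exact Or.inr (Or.inr (Or.inl ((hwin 3 (by omega)).mpr ⟨i, ⟨hi.1, by push_cast; omega⟩, by norm_num⟩)))
    · exact Or.inr (Or.inr (Or.inr ((hwin 4 (by omega)).mpr ⟨i, ⟨hi.1, by push_cast; omega⟩, by norm_num⟩)))
  · intro hg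
    have build : ∀ n : Int, n ∈ ([1, 2, 3, 4] : List Int) → ∀ i : Int,
        0 ≤ i → i + n ≤ (t.length : Int) →
        PySem.List.slice t (some i) (some (i + n)) ∈ pvGrams t := by
      intro n hn4 i h0 hle
      refine List.mem_flatMap.mpr ⟨i, ?_, ?_⟩
      · rw [PySem.List.mem_pyRange_one]
        constructor
        · exact h0
        · fin_cases hn4 <;> omega
      · refine List.mem_map.mpr ⟨n, List.mem_filter.mpr ⟨hn4, decide_eq_true hle⟩, rfl⟩
    rcases hg with h | h | h | h
    · rcases (hwin 1 (by omega)).mp h with ⟨i, ⟨h0, hlt⟩, rfl⟩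
      exact build 1 (by norm_num) i h0 (by push_cast at hlt ⊢; omega)
    · rcases (hwin 2 (by omega)).mp h with ⟨i, ⟨h0, hlt⟩, rfl⟩
      exact build 2 (by norm_num) i h0 (by push_cast at hlt ⊢; omega)
    · rcases (hwin 3 (by omega)).mp h with ⟨i, ⟨h0, hlt⟩, rfl⟩
      exact build 3 (by norm_num) i h0 (by push_cast at hlt ⊢; omega)
    · rcases (hwin 4 (by omega)).mp h with ⟨i, ⟨h0, hlt⟩, rfl⟩
      exact build 4 (by norm_num) i h0 (by push_cast at hlt ⊢; omega)

-- the number of grams per position, summed, equals the window counts summed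
theorem pvCountRange (L : Nat) (n : Nat) (hn : 1 ≤ n) :
    ((PySem.List.pyRange 0 (L : Int) 1).map
      (fun i => if i + (n : Int) ≤ (L : Int) then (1 : Int) else 0)).sum
      = ((L + 1 - n : Nat) : Int) := by
  by_cases hnL : n ≤ L
  · have hsplit := PySem.List.pyRange_one_append 0 ((L : Int) - n + 1) (L : Int)
      (by omega) (by omega)
    rw [hsplit, List.map_append, List.sum_append]
    have h1 : (PySem.List.pyRange 0 ((L : Int) - n + 1) 1).map
        (fun i => if i + (n : Int) ≤ (L : Int) then (1 : Int) else 0)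
        = (PySem.List.pyRange 0 ((L : Int) - n + 1) 1).map (fun _ => (1 : Int)) := by
      apply List.map_congr_left
      intro i hi
      rw [PySem.List.mem_pyRange_one] at hi
      rw [if_pos (by omega)]
    have h2 : (PySem.List.pyRange ((L : Int) - n + 1) (L : Int) 1).map
        (fun i => if i + (n : Int) ≤ (L : Int) then (1 : Int) else 0)
        = (PySem.List.pyRange ((L : Int) - n + 1) (L : Int) 1).map (fun _ => (0 : Int)) := by
      apply List.map_congr_left
      intro i hi
      rw [PySem.List.mem_pyRange_one] at hi
      rw [if_neg (by omega)]
    rw [h1, h2]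
    simp only [PySem.List.sum_map_const_int]
    rw [PySem.List.length_pyRange_one, PySem.List.length_pyRange_one]
    omega
  · have h0 : (PySem.List.pyRange 0 (L : Int) 1).map
        (fun i => if i + (n : Int) ≤ (L : Int) then (1 : Int) else 0)
        = (PySem.List.pyRange 0 (L : Int) 1).map (fun _ => (0 : Int)) := by
      apply List.map_congr_left
      intro i hi
      rw [PySem.List.mem_pyRange_one] at hi
      rw [if_neg (by omega)]
    rw [h0]
    simp only [PySem.List.sum_map_const_int]
    omega

theorem pvInner_length (t : List String) (i : Int) :
    ((pvInner t i).length : Int)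
      = (if i + 1 ≤ (t.length : Int) then (1 : Int) else 0)
        + (if i + 2 ≤ (t.length : Int) then (1 : Int) else 0)
        + (if i + 3 ≤ (t.length : Int) then (1 : Int) else 0)
        + (if i + 4 ≤ (t.length : Int) then (1 : Int) else 0) := by
  by_cases h1 : i + 1 ≤ (t.length : Int) <;>
    by_cases h2 : i + 2 ≤ (t.length : Int) <;>
      by_cases h3 : i + 3 ≤ (t.length : Int) <;>
        by_cases h4 : i + 4 ≤ (t.length : Int) <;>
          simp [pvInner, List.filter, h1, h2, h3, h4]

theorem pvSum_map_add (l : List Int) (f g : Int → Int) :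
    (l.map (fun i => f i + g i)).sum = (l.map f).sum + (l.map g).sum := by
  induction l with
  | nil => simp
  | cons x l ih => simp [ih]; ring

-- total number of grams visited = sum of the four window counts
theorem pvGrams_length (t : List String) :
    ((pvGrams t).length : Int)
      = ((pvWins 1 t).length : Int) + ((pvWins 2 t).length : Int)
        + ((pvWins 3 t).length : Int) + ((pvWins 4 t).length : Int) := by
  rw [pvGrams, List.length_flatMap, Nat.cast_list_sum, List.map_map]
  show (List.map (fun i => ((pvInner t i).length : Int)) (PySem.List.pyRange 0 (t.length : Int) 1)).sum = _
  have hrw : (PySem.List.pyRange 0 (t.length : Int) 1).map (fun i => ((pvInner t i).length : Int))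
      = (PySem.List.pyRange 0 (t.length : Int) 1).map (fun i =>
          ((if i + 1 ≤ (t.length : Int) then (1 : Int) else 0)
            + (if i + 2 ≤ (t.length : Int) then (1 : Int) else 0)
            + (if i + 3 ≤ (t.length : Int) then (1 : Int) else 0))
            + (if i + 4 ≤ (t.length : Int) then (1 : Int) else 0)) := by
    apply List.map_congr_left
    intro i _
    rw [pvInner_length]
  rw [hrw, pvSum_map_add, pvSum_map_add, pvSum_map_add]
  have c1 := pvCountRange t.length 1 (by omega)
  have c2 := pvCountRange t.length 2 (by omega)
  have c3 := pvCountRange t.length 3 (by omega)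
  have c4 := pvCountRange t.length 4 (by omega)
  simp only [Nat.cast_one, Nat.cast_ofNat] at c1 c2 c3 c4
  rw [c1, c2, c3, c4]
  rw [pvWins_length 1 (by omega), pvWins_length 2 (by omega),
    pvWins_length 3 (by omega), pvWins_length 4 (by omega)]

-- the four window toFinsets are pairwise disjoint (distinct gram lengths)
theorem pvWins_disjoint (t : List String) (m n : Nat) (hm : 1 ≤ m) (hn : 1 ≤ n) (hmn : m ≠ n) :
    Disjoint (pvWins m t).toFinset (pvWins n t).toFinset := by
  rw [Finset.disjoint_left]
  intro g hgm hgn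
  rw [List.mem_toFinset] at hgm hgn
  have h1 := pvWins_mem_length m hm t g hgm
  have h2 := pvWins_mem_length n hn t g hgn
  omega

-- number of distinct grams overall = sum of distinct window counts per n
theorem pvGrams_distinct (t : List String) :
    ((PySem.Set.ofList (pvGrams t)).length : Int)
      = ((PySem.Set.ofList (pvWins 1 t)).length : Int)
        + ((PySem.Set.ofList (pvWins 2 t)).length : Int)
        + ((PySem.Set.ofList (pvWins 3 t)).length : Int)
        + ((PySem.Set.ofList (pvWins 4 t)).length : Int) := by
  simp only [pvOfList_length]
  have hfin : (pvGrams t).toFinset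
      = ((pvWins 1 t).toFinset ∪ (pvWins 2 t).toFinset)
        ∪ ((pvWins 3 t).toFinset ∪ (pvWins 4 t).toFinset) := by
    ext g
    simp only [List.mem_toFinset, Finset.mem_union, pvMem_grams]
    tauto
  rw [hfin]
  rw [Finset.card_union_of_disjoint (by
    rw [Finset.disjoint_union_left]
    constructor <;> rw [Finset.disjoint_union_right] <;>
      exact ⟨pvWins_disjoint t _ _ (by omega) (by omega) (by omega),
             pvWins_disjoint t _ _ (by omega) (by omega) (by omega)⟩)]
  rw [Finset.card_union_of_disjoint (pvWins_disjoint t 1 2 (by omega) (by omega) (by omega))]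
  rw [Finset.card_union_of_disjoint (pvWins_disjoint t 3 4 (by omega) (by omega) (by omega))]
  push_cast
  ring

-- ===== VERDICT (by name: the statement is the Claim_ definition above) =====
theorem calculate_repetition_scores_spec : Claim_equal_calculate_repetition_scores := by
  intro text _
  show calculate_repetition_scores text = calculate_repetition_scores_alt text
  simp only [calculate_repetition_scores, calculate_repetition_scores_alt, pvA_get_tokens]
  set t := PySem.Str.split₀ (PySem.Str.strip (PySem.Str.replace text "\n" " ")) with ht
  by_cases h : t = []
  · rw [if_pos h, if_pos h]
  · rw [if_neg h, if_neg h]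
    -- evaluate B's side first: the streaming fold over all visited grams
    have hup : PySem.Set.update PySem.Set.empty (pvGrams t) = PySem.Set.ofList (pvGrams t) := by
      rw [PySem.Set.ofList_eq_foldl]; rfl
    rw [pvOuter_fold t, pvStream (pvGrams t) PySem.Set.empty 0, hup]
    -- evaluate A's side: sum over n = 1..4 of (len - distinct) per window list
    have hr : PySem.List.pyRange 1 5 1 = [1, 2, 3, 4] := by decide
    rw [hr]
    simp only [List.map_cons, List.map_nil, List.sum_cons, List.sum_nil]
    have hseg : ∀ (n : Nat), 1 ≤ n → pvA_get_ngrams t (n : Int) = pvWins n t →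
        pvA_calc_segment t (n : Int)
          = ((pvWins n t).length : Int) - ((PySem.Set.ofList (pvWins n t)).length : Int) := by
      intro n hn hA
      rw [pvA_calc_segment, hA]
      exact pvSeg_eq (pvWins n t)
    have h1 := hseg 1 (by omega) (by exact_mod_cast pvA_ngrams_one t)
    have h2 := hseg 2 (by omega) (by exact_mod_cast pvA_ngrams_two t)
    have h3 := hseg 3 (by omega) (by exact_mod_cast pvA_ngrams_three t)
    have h4 := hseg 4 (by omega) (by exact_mod_cast pvA_ngrams_four t)
    push_cast at h1 h2 h3 h4
    rw [h1, h2, h3, h4]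
    refine congrArg (fun v => [("SRS", v)]) ?_
    have hlen := pvGrams_length t
    have hdis := pvGrams_distinct t
    show _ = 0 + ((pvGrams t).length : Int)
      - (((PySem.Set.ofList (pvGrams t)).length : Int) - ((PySem.Set.empty : PySem.Set (List String)).length : Int))
    rw [hlen, hdis]
    show _ = 0 + _ - (_ - ((0 : Nat) : Int))
    push_cast
    ring
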